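-- pv_equiv track=rewrite | github.com/Kawser-nerd/CLCDSA | Source Codes/AtCoder/abc117/D/4983358.py | solve
-- ===== SOURCE A (Python) =====
-- def solve(n, k, a):
--     x = [2**i for i in range(50, -1, -1)]
--     ans = 0
--     for x_i in x:
--         u, v = 0, 0
--         for a_j in a:
--             u += x_i ^ (x_i & a_j)
--             v +=       (x_i & a_j)
--         if (x_i <= k) and (u > v):
--             k -= x_i
--             ans += u
--         else:
--             ans += v
--     return ans
-- ===== SOURCE B (Python) =====
-- def solve(n, k, a):
--     # One pass over a builds a table s[i] = sum of (a_j & 2**i); the bit-descending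
--     # decision loop then consults the table instead of rescanning a, deriving the
--     # unmatched sum u arithmetically as len(a)*2**i - s[i].
--     pows = [2**i for i in range(51)]
--     s = [0] * 51
--     for a_j in a:
--         s = [c + (a_j & p) for c, p in zip(s, pows)]
--     m = len(a)
--     ans = 0
--     for i in range(50, -1, -1):
--         p = pows[i]
--         v = s[i]
--         u = m * p - v
--         if p <= k and u > v:
--             k -= p
--             ans += u
--         else:
--             ans += v
--     return ans
-- ===== Notes on version B (the rewrite author's own statement) =====
-- stated objective: alternative
-- what changed: A rescans the whole list a inside each of the 51 bit iterations computing the matched/unmatched sums with per-element xor/and; B makes one element-major pass building a 51-entry table of masked sums s[i] = sum(a_j & 2**i), and the bit-descending budget loop then consults the table, deriving the unmatched sum arithmetically as len(a)*2**i - s[i].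
import Mathlib
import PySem

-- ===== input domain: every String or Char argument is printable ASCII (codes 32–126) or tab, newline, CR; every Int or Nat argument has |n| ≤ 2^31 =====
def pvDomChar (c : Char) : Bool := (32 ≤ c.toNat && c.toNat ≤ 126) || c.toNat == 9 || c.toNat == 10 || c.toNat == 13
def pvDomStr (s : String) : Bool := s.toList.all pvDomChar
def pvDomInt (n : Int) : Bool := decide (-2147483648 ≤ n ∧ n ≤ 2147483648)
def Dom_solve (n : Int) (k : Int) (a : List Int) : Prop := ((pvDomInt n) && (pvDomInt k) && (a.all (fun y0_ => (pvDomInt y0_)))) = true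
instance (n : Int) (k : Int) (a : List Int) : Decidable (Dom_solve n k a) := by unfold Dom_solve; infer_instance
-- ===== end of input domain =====

-- B replaces A's per-bit rescans of a with one pass building a table of masked sums,
-- consulted by a separate bit-descending decision loop (objective: alternative decomposition).

-- ===== PORT A =====
-- x = [2**i for i in range(50,-1,-1)]; every i produced is ≥ 0, so 2**i is 2 ^ i.toNat
def solve (n : Int) (k : Int) (a : List Int) : Int :=
  let x : List Int := (PySem.List.pyRange 50 (-1) (-1)).map (fun i => (2 : Int) ^ i.toNat)
  let r := x.foldl (fun (st : Int × Int) (xi : Int) =>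
    let uv := a.foldl (fun (uv : Int × Int) (aj : Int) =>
      (uv.1 + PySem.Int.bxor xi (PySem.Int.band xi aj), uv.2 + PySem.Int.band xi aj)) (0, 0)
    if xi ≤ st.1 ∧ uv.1 > uv.2 then (st.1 - xi, st.2 + uv.1) else (st.1, st.2 + uv.2)) (k, 0)
  r.2

-- ===== PORT B =====
-- pows[i] and s[i] are read with pyGetD _ _ 0; the index is always in range 0..50 here,
-- so the default 0 is never returned (faithful to Python's in-range indexing).
def solve_alt (n : Int) (k : Int) (a : List Int) : Int :=
  let pows : List Int := (List.range 51).map (fun i => (2 : Int) ^ i)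
  let s := a.foldl (fun (s : List Int) (aj : Int) =>
    List.zipWith (fun c p => c + PySem.Int.band aj p) s pows) (List.replicate 51 0)
  let m : Int := a.length
  let r := (PySem.List.pyRange 50 (-1) (-1)).foldl (fun (st : Int × Int) (i : Int) =>
    let p := PySem.List.pyGetD pows i 0
    let v := PySem.List.pyGetD s i 0
    let u := m * p - v
    if p ≤ st.1 ∧ u > v then (st.1 - p, st.2 + u) else (st.1, st.2 + v)) (k, 0)
  r.2

-- ===== PRECONDITION & SPEC =====
def Spec_solve (n : Int) (k : Int) (a : List Int) (out : Int) : Prop := out = solve_alt n k a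
instance (n : Int) (k : Int) (a : List Int) (out : Int) : Decidable (Spec_solve n k a out) := by unfold Spec_solve; infer_instance

-- ===== CLAIM (what is proved, stated in full; the proofs are below) =====
def Claim_equal_solve : Prop := ∀ (n : Int) (k : Int) (a : List Int), Dom_solve n k a → Spec_solve n k a (solve n k a)

-- ===== LEMMAS AND PROOFS =====

-- masked sum of a against mask x, in B's operand order
def pvV (a : List Int) (x : Int) : Int := (a.map (fun aj => PySem.Int.band aj x)).sum

theorem pvV_cons (aj : Int) (a : List Int) (x : Int) :
    pvV (aj :: a) x = PySem.Int.band aj x + pvV a x := by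
  simp [pvV]

-- a power-of-two mask picks out 0 or the whole power
theorem pv_band_pow_dichotomy (i : Nat) (aj : Int) :
    PySem.Int.band ((2:Int)^i) aj = 0 ∨ PySem.Int.band ((2:Int)^i) aj = (2:Int)^i := by
  have h2 : ((2:Int)^i).toNat = 2^i := by
    have h : ((2:Int)^i) = ((2^i : Nat) : Int) := by push_cast; ring
    rw [h, Int.toNat_natCast]
  have hnn : (0:Int) ≤ (2:Int)^i := by positivity
  unfold PySem.Int.band
  rw [if_pos hnn]
  split_ifs with hb
  · rw [h2, Nat.land_comm, Nat.and_two_pow]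
    cases hbit : aj.toNat.testBit i
    · left; simp
    · right; simp
  · rw [h2, Nat.land_comm, Nat.and_two_pow]
    cases hbit : (-aj - 1).toNat.testBit i
    · right
      simp only [Bool.toNat_false, Nat.zero_mul, Nat.sub_zero]
      push_cast; ring
    · left
      simp

theorem pv_bxor_band_pow (i : Nat) (aj : Int) :
    PySem.Int.bxor ((2:Int)^i) (PySem.Int.band ((2:Int)^i) aj)
      = (2:Int)^i - PySem.Int.band ((2:Int)^i) aj := by
  rcases pv_band_pow_dichotomy i aj with h | h <;> rw [h] <;> simp

-- A's inner scan of a, characterized by the masked sum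
theorem pv_inner_fold (i : Nat) (a : List Int) (u0 v0 : Int) :
    a.foldl (fun (uv : Int × Int) (aj : Int) =>
        (uv.1 + PySem.Int.bxor ((2:Int)^i) (PySem.Int.band ((2:Int)^i) aj),
         uv.2 + PySem.Int.band ((2:Int)^i) aj)) (u0, v0)
      = (u0 + ((a.length : Int) * (2:Int)^i - pvV a ((2:Int)^i)),
         v0 + pvV a ((2:Int)^i)) := by
  induction a generalizing u0 v0 with
  | nil => simp [pvV]
  | cons aj rest ih =>
    simp only [List.foldl_cons, ih, pvV_cons, List.length_cons]
    rw [pv_bxor_band_pow i aj, PySem.Int.band_comm]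
    simp only [Prod.mk.injEq]
    constructor <;> push_cast <;> ring

theorem pv_zipWith_const (s0 pows : List Int) (h : s0.length ≤ pows.length) :
    List.zipWith (fun c (_ : Int) => c) s0 pows = s0 := by
  induction s0 generalizing pows with
  | nil => simp
  | cons c s ih =>
    cases pows with
    | nil => simp at h
    | cons p ps => simp only [List.zipWith_cons_cons]
                   rw [ih ps (by simpa using h)]

-- B's one-pass table build, characterized pointwise by masked sums
theorem pv_table_fold (a : List Int) (s0 pows : List Int) (h : s0.length ≤ pows.length) :
    a.foldl (fun (s : List Int) (aj : Int) =>
        List.zipWith (fun c p => c + PySem.Int.band aj p) s pows) s0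
      = List.zipWith (fun c p => c + pvV a p) s0 pows := by
  induction a generalizing s0 with
  | nil =>
    simp only [List.foldl_nil, pvV, List.map_nil, List.sum_nil, Int.add_zero]
    exact (pv_zipWith_const s0 pows h).symm
  | cons aj rest ih =>
    simp only [List.foldl_cons]
    rw [ih _ (by simp [h])]
    clear ih h
    induction s0 generalizing pows with
    | nil => simp
    | cons c s ihs =>
      cases pows with
      | nil => simp
      | cons p ps => simp [ihs, pvV_cons]; ring

theorem pv_pyRange_down : PySem.List.pyRange 50 (-1) (-1)
    = [50, 49, 48, 47, 46, 45, 44, 43, 42, 41, 40, 39, 38, 37, 36, 35, 34, 33, 32, 31,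
       30, 29, 28, 27, 26, 25, 24, 23, 22, 21, 20, 19, 18, 17, 16, 15, 14, 13, 12, 11,
       10, 9, 8, 7, 6, 5, 4, 3, 2, 1, 0] := by decide

theorem pv_mem_range_down (i : Int) (h : i ∈ PySem.List.pyRange 50 (-1) (-1)) :
    0 ≤ i ∧ i ≤ 50 := by
  rw [pv_pyRange_down] at h
  simp only [List.mem_cons, List.not_mem_nil, or_false] at h
  omega

-- the table entry B reads is the masked sum at that bit
theorem pv_table_getD (a : List Int) (j : Nat) (hj : j < 51) :
    (List.zipWith (fun c p => c + pvV a p) (List.replicate 51 (0:Int))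
        ((List.range 51).map (fun i => (2 : Int) ^ i))).getD j 0
      = pvV a ((2:Int)^j) := by
  rw [List.getD_eq_getElem _ _ (by simpa using hj)]
  simp only [List.getElem_zipWith, List.getElem_replicate, List.getElem_map,
    List.getElem_range]
  ring

theorem pv_pows_getD (j : Nat) (hj : j < 51) :
    (((List.range 51).map (fun i => (2 : Int) ^ i)).getD j 0) = (2:Int)^j := by
  rw [List.getD_eq_getElem _ _ (by simpa using hj)]
  simp only [List.getElem_map, List.getElem_range]

-- ===== VERDICT (by name: the statement is the Claim_ definition above) =====
theorem solve_spec : Claim_equal_solve := by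
  intro n k a _
  unfold Spec_solve solve solve_alt
  simp only [List.foldl_map]
  rw [pv_table_fold a _ _ (by simp)]
  apply congrArg
  apply PySem.List.foldl_congr_mem
  intro st i hi
  obtain ⟨h0, h50⟩ := pv_mem_range_down i hi
  have hi' : (i.toNat : Int) = i := Int.toNat_of_nonneg h0
  have hjlt : i.toNat < 51 := by omega
  rw [← hi', PySem.List.pyGetD_natCast, PySem.List.pyGetD_natCast,
      pv_pows_getD _ hjlt, pv_table_getD a _ hjlt, pv_inner_fold]
  simp only [Int.toNat_natCast, zero_add]
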